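-- pv_equiv track=rewrite | github.com/poonamangne/Programming-Exercises-1 | Chapter06_29.py | sumOfOddPlace
-- ===== SOURCE A (Python) =====
-- def sumOfOddPlace(number):
--     size = getSize(number) # Get number of digits in the number
--     sumOfOddPlaceDigits = 0
--     for i in range(1, size + 1):
--         digit = number % 10
--         number = number // 10
--         if i % 2 != 0: # Check if odd place digit
--             sumOfOddPlaceDigits += digit
--     return sumOfOddPlaceDigits
--
-- def getSize(d):
--     count = 0 # Count the number of digits
--     while d > 0:
--         d = d // 10
--         count += 1
--     return count
-- ===== SOURCE B (Python) =====
-- def sumOfOddPlace(number):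
--     total = 0
--     while number > 0:
--         total += number % 10
--         number //= 100
--     return total
-- ===== Notes on version B (the rewrite author's own statement) =====
-- stated objective: simpler
-- what changed: Instead of iterating every digit with a position counter and an odd-position branch (after a separate digit-counting pass), B strides through the number two digits at a time with //= 100, so only odd-position digits are ever visited and both the getSize pass and the parity test disappear.
import Mathlib
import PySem

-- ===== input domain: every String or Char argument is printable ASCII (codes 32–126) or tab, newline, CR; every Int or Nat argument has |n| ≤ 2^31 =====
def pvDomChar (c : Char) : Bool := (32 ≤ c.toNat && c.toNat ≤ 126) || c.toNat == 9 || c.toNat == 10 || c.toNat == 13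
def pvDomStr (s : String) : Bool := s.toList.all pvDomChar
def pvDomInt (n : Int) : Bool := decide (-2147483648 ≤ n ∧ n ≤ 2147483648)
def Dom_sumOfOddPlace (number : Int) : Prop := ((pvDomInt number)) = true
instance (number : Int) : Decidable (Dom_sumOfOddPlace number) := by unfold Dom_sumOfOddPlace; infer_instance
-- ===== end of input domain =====

-- B strides through the number two digits at a time with //=100, so only odd-position digits are visited; the getSize pass and the parity branch of A disappear.


-- ===== PORT A =====
-- getSize: while d > 0: d //= 10; count += 1
def getSize (d : Int) : Int :=
  if 0 < d then getSize (PySem.Int.floordiv d 10) + 1 else 0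
termination_by d.toNat
decreasing_by
  rename_i h
  rw [PySem.Int.floordiv_eq_ediv_of_pos (by omega)]
  omega

def sumOfOddPlace (number : Int) : Int :=
  let size := getSize number
  ((PySem.List.pyRange 1 (size + 1) 1).foldl
    (fun (st : Int × Int) i =>
      let digit := PySem.Int.mod st.1 10
      let n := PySem.Int.floordiv st.1 10
      (n, if PySem.Int.mod i 2 ≠ 0 then st.2 + digit else st.2))
    (number, 0)).2

-- ===== PORT B =====
-- while number > 0: total += number % 10; number //= 100
def altLoop (number total : Int) : Int :=
  if 0 < number then
    altLoop (PySem.Int.floordiv number 100) (total + PySem.Int.mod number 10)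
  else total
termination_by number.toNat
decreasing_by
  rename_i h
  rw [PySem.Int.floordiv_eq_ediv_of_pos (by omega)]
  omega

def sumOfOddPlace_alt (number : Int) : Int :=
  altLoop number 0

-- ===== PRECONDITION & SPEC =====
def Spec_sumOfOddPlace (number : Int) (out : Int) : Prop := out = sumOfOddPlace_alt number
instance (number : Int) (out : Int) : Decidable (Spec_sumOfOddPlace number out) := by unfold Spec_sumOfOddPlace; infer_instance

-- ===== CLAIM (what is proved, stated in full; the proofs are below) =====
def Claim_equal_sumOfOddPlace : Prop := ∀ (number : Int), Dom_sumOfOddPlace number → Spec_sumOfOddPlace number (sumOfOddPlace number)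

-- ===== LEMMAS AND PROOFS =====

theorem getSize_nonneg (d : Int) : 0 ≤ getSize d := by
  unfold getSize
  split
  · have := getSize_nonneg (PySem.Int.floordiv d 10)
    omega
  · omega
termination_by d.toNat
decreasing_by
  rename_i h _
  rw [PySem.Int.floordiv_eq_ediv_of_pos (by omega)]
  omega

-- A's range fold, started at any ODD position i over exactly getSize n steps, equals B's stride-100 loop:
-- position i takes n % 10, position i+1 contributes nothing, and the recursion continues at i+2 over n // 100.
theorem fold_eq_altLoop (n s i : Int) (hodd : i % 2 = 1) :
    ((PySem.List.pyRange i (i + getSize n) 1).foldl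
      (fun (st : Int × Int) j =>
        (PySem.Int.floordiv st.1 10,
          if PySem.Int.mod j 2 ≠ 0 then st.2 + PySem.Int.mod st.1 10 else st.2))
      (n, s)).2 = altLoop n s := by
  by_cases h : 0 < n
  · have hrec : getSize n = getSize (PySem.Int.floordiv n 10) + 1 := by
      rw [getSize]; simp [h]
    have hmodI : PySem.Int.mod i 2 = 1 := by
      rw [PySem.Int.mod_eq_emod_of_pos (by omega)]; exact hodd
    by_cases h10 : n < 10
    · -- one digit left: a single fold step at the odd position i
      have hd0 : PySem.Int.floordiv n 10 = 0 := by
        rw [PySem.Int.floordiv_eq_ediv_of_pos (by omega)]; omega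
      have hs1 : getSize n = 1 := by
        rw [hrec, hd0, getSize]; simp
      rw [hs1, PySem.List.pyRange_one_cons (by omega)]
      have hnil : PySem.List.pyRange (i + 1) (i + 1) 1 = [] := by
        rw [PySem.List.pyRange_one_eq_nil (by omega)]
      simp only [hnil, List.foldl_cons, List.foldl_nil, hmodI]
      have hd100 : PySem.Int.floordiv n 100 = 0 := by
        rw [PySem.Int.floordiv_eq_ediv_of_pos (by omega)]; omega
      rw [altLoop]; simp only [h, if_pos]
      rw [hd100, altLoop]
      simp
    · -- at least two digits: two fold steps at i (odd) and i+1 (even), then recurse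
      have hd10pos : 0 < PySem.Int.floordiv n 10 := by
        rw [PySem.Int.floordiv_eq_ediv_of_pos (by omega)]; omega
      have hrec2 : getSize (PySem.Int.floordiv n 10) =
          getSize (PySem.Int.floordiv (PySem.Int.floordiv n 10) 10) + 1 := by
        rw [getSize, if_pos hd10pos]
      have h100 : PySem.Int.floordiv (PySem.Int.floordiv n 10) 10 =
          PySem.Int.floordiv n 100 := by
        rw [PySem.Int.floordiv_eq_ediv_of_pos (show (0:Int) < 10 by omega),
            PySem.Int.floordiv_eq_ediv_of_pos (show (0:Int) < 10 by omega),
            PySem.Int.floordiv_eq_ediv_of_pos (show (0:Int) < 100 by omega)]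
        omega
      have hge : 0 ≤ getSize (PySem.Int.floordiv n 100) := getSize_nonneg _
      have hsz : getSize n = getSize (PySem.Int.floordiv n 100) + 2 := by
        rw [hrec, hrec2, h100]; ring
      have hmodI1 : PySem.Int.mod (i + 1) 2 = 0 := by
        rw [PySem.Int.mod_eq_emod_of_pos (show (0:Int) < 2 by omega)]
        show (i + 1) % 2 = 0
        omega
      rw [hsz,
          PySem.List.pyRange_one_cons (show i < i + (getSize (PySem.Int.floordiv n 100) + 2) by omega),
          PySem.List.pyRange_one_cons (show i + 1 < i + (getSize (PySem.Int.floordiv n 100) + 2) by omega)]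
      simp only [List.foldl_cons]
      rw [hmodI, hmodI1,
          if_pos (show (1:Int) ≠ 0 by norm_num), if_neg (show ¬ (0:Int) ≠ 0 by norm_num),
          h100, show i + 1 + 1 = i + 2 by ring]
      have ih := fold_eq_altLoop (PySem.Int.floordiv n 100)
        (s + PySem.Int.mod n 10) (i + 2) (by show (i + 2) % 2 = 1; omega)
      rw [show i + 2 + getSize (PySem.Int.floordiv n 100)
            = i + (getSize (PySem.Int.floordiv n 100) + 2) by ring] at ih
      rw [ih]
      conv_rhs => rw [altLoop]
      rw [if_pos h]
  · have h0 : getSize n = 0 := by rw [getSize]; simp [h]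
    rw [h0, PySem.List.pyRange_one_eq_nil (by omega), altLoop]
    simp [h]
termination_by n.toNat
decreasing_by
  rename_i h
  rw [PySem.Int.floordiv_eq_ediv_of_pos (by omega)]
  omega

-- ===== VERDICT (by name: the statement is the Claim_ definition above) =====
theorem sumOfOddPlace_spec : Claim_equal_sumOfOddPlace := by
  intro number _
  unfold Spec_sumOfOddPlace sumOfOddPlace sumOfOddPlace_alt
  have := fold_eq_altLoop number 0 1 (by decide)
  rw [show (1 : Int) + getSize number = getSize number + 1 by ring] at this
  exact this
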